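-- pv_equiv track=rewrite | github.com/kuopinghsu/jv32.dev | scripts/sv_format.py | _pass_trailing_comments
-- ===== SOURCE A (Python) =====
-- from typing import Dict, List, Optional, Tuple
--
-- def split_comment(line: str) -> Tuple[str, Optional[str]]:
--     """Split a line into (code, trailing_comment) respecting string literals."""
--     in_string = False
--     escaped = False
--     for i, ch in enumerate(line):
--         if escaped:
--             escaped = False
--             continue
--         if ch == "\\":
--             escaped = True
--             continue
--         if ch == '"':
--             in_string = not in_string
--             continue
--         if not in_string and line[i : i + 2] == "//":
--             return line[:i].rstrip(), line[i:].rstrip("\n")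
--     return line.rstrip("\n"), None
--
-- def get_indent(line: str) -> str:
--     return line[: len(line) - len(line.lstrip())]
--
-- def _is_group_breaker(line: str) -> bool:
--     s = line.strip()
--     return (not s or s.startswith("//") or s.startswith("/*")
--             or s.startswith("*") or s.startswith("`"))
--
-- def _pass_trailing_comments(lines: List[str]) -> Tuple[List[str], bool]:
--     out = list(lines)
--     changed = False
--     i = 0
--     while i < len(lines):
--         if _is_group_breaker(lines[i]):
--             i += 1
--             continue
--
--         group_indent = get_indent(lines[i])
--         group: List[int] = []
--         while (i < len(lines)
--                and not _is_group_breaker(lines[i])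
--                and get_indent(lines[i]) == group_indent):
--             group.append(i)
--             i += 1
--
--         commented: List[Tuple[int, str, str]] = []
--         for idx in group:
--             code, comment = split_comment(lines[idx])
--             if comment is not None and code.strip():
--                 commented.append((idx, code, comment))
--
--         if len(commented) < 2:
--             continue
--
--         col = max(len(code) for _, code, _ in commented) + 2
--         for idx, code, comment in commented:
--             new_line = code.ljust(col) + comment + "\n"
--             if new_line != lines[idx]:
--                 out[idx] = new_line
--                 changed = True
--
--     return out, changed
-- ===== SOURCE B (Python) =====
-- from typing import Dict, List, Optional, Tuple
--
-- def split_comment(line: str) -> Tuple[str, Optional[str]]: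
--     """Split a line into (code, trailing_comment) respecting string literals."""
--     in_string = False
--     escaped = False
--     for i, ch in enumerate(line):
--         if escaped:
--             escaped = False
--             continue
--         if ch == "\\":
--             escaped = True
--             continue
--         if ch == '"':
--             in_string = not in_string
--             continue
--         if not in_string and line[i : i + 2] == "//":
--             return line[:i].rstrip(), line[i:].rstrip("\n")
--     return line.rstrip("\n"), None
--
-- def get_indent(line: str) -> str:
--     return line[: len(line) - len(line.lstrip())]
--
-- def _is_group_breaker(line: str) -> bool:
--     s = line.strip()
--     return (not s or s.startswith("//") or s.startswith("/*")
--             or s.startswith("*") or s.startswith("`"))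
--
-- def _pass_trailing_comments(lines: List[str]) -> Tuple[List[str], bool]:
--     # Pass 1: label every line with a group id (None for breaker lines); a new
--     # id is opened after a breaker or when the indent changes.
--     gids: List[Optional[int]] = []
--     gid = -1
--     prev: Optional[str] = None
--     for line in lines:
--         if _is_group_breaker(line):
--             gids.append(None)
--             prev = None
--             continue
--         ind = get_indent(line)
--         if prev is None or ind != prev:
--             gid += 1
--             prev = ind
--         gids.append(gid)
--
--     # Pass 2: aggregate per group id, in a dict, the number of alignable lines
--     # and the maximum code width.  No group lists are ever materialised.
--     parsed = [split_comment(line) for line in lines]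
--     stats: Dict[int, Tuple[int, int]] = {}
--     for g, (code, comment) in zip(gids, parsed):
--         if g is not None and comment is not None and code.strip():
--             cnt, mx = stats.get(g, (0, 0))
--             stats[g] = (cnt + 1, max(mx, len(code)))
--
--     # Pass 3: rewrite each line independently from its own group's stats.
--     out: List[str] = []
--     changed = False
--     for line, g, (code, comment) in zip(lines, gids, parsed):
--         if (g is not None and comment is not None and code.strip()
--                 and stats[g][0] >= 2):
--             new_line = code.ljust(stats[g][1] + 2) + comment + "\n"
--             if new_line != line:
--                 out.append(new_line)
--                 changed = True
--                 continue
--         out.append(line)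
--     return out, changed
-- ===== Notes on version B (the rewrite author's own statement) =====
-- stated objective: alternative
-- what changed: A's interleaved while-loop that materialises each group's index list and formats it in place is replaced by three flat line-wise passes with no group lists at all: label every line with a group id, aggregate (count, max code width) per id into a dict, then rebuild the output line by line from each line's own id and its dict entry.
import Mathlib
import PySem

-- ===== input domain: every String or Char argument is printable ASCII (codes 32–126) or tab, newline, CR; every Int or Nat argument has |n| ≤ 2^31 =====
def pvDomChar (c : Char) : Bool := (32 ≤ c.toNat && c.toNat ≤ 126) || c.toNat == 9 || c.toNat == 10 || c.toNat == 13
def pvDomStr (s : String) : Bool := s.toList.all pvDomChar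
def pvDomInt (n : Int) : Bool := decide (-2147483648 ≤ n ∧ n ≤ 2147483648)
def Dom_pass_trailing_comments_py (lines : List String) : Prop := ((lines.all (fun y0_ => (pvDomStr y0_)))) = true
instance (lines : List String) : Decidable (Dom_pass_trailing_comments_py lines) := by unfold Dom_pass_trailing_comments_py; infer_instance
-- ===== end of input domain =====

-- B replaces A's interleaved group-collecting while-loop by three flat per-line
-- passes (group-id labels, a dict of per-id (count, max width), a line-wise
-- rewrite); same results, objective: alternative structure.

-- ===== PORT A =====
-- shared module helpers (used by both Pythons): split_comment / get_indent / _is_group_breaker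

-- s.rstrip("\n"): drop trailing newline characters (hand port, exact)
def rstripNl (cs : List Char) : List Char := (cs.reverse.dropWhile (· == '\n')).reverse

-- split_comment's scanning loop: pre = line[:i] already consumed, rest = line[i:]
def splitCommentGo (pre rest : List Char) (inString escaped : Bool) :
    List Char × Option (List Char) :=
  match rest with
  | [] => (rstripNl pre, none)
  | c :: cs =>
    if escaped then splitCommentGo (pre ++ [c]) cs inString false
    else if c == '\\' then splitCommentGo (pre ++ [c]) cs inString true
    else if c == '"' then splitCommentGo (pre ++ [c]) cs (!inString) escaped
    else if !inString && c == '/' && cs.head? == some '/' then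
      -- line[i:i+2] == "//"
      (PySem.Chars.rstrip pre, rstripNl (c :: cs))
    else splitCommentGo (pre ++ [c]) cs inString escaped

def splitComment (line : List Char) : List Char × Option (List Char) :=
  splitCommentGo [] line false false

def getIndent (line : List Char) : List Char :=
  line.take (line.length - (PySem.Chars.lstrip line).length)

def isGroupBreaker (line : List Char) : Bool :=
  let s := PySem.Chars.strip line
  s.isEmpty || PySem.Chars.startswith s ['/', '/'] || PySem.Chars.startswith s ['/', '*'] ||
    PySem.Chars.startswith s ['*'] || PySem.Chars.startswith s ['`']

-- lines[i] for an in-range i (every access below is guarded by i < len)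
def lineAt (lines : List String) (i : Nat) : List Char := (lines.getD i "").toList

-- A's inner while: collect the indices of the current group
def collectA (lines : List String) (ind : List Char) (j : Nat) : List Nat :=
  if h : j < lines.length ∧ isGroupBreaker (lineAt lines j) = false ∧
      getIndent (lineAt lines j) = ind then
    j :: collectA lines ind (j + 1)
  else []
termination_by lines.length - j
decreasing_by
  have := h.1
  omega

-- A's group body: build `commented`, bail out below 2, align (the max runs over
-- a nonempty list of Nat lengths, so folding from 0 is Python's max exactly)
def fmtGroupA (lines : List String) (group : List Nat) (st : List String × Bool) :
    List String × Bool :=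
  let commented := group.foldl (fun acc idx =>
    let r := splitComment (lineAt lines idx)
    match r.2 with
    | some comment =>
        if (PySem.Chars.strip r.1).isEmpty then acc else acc ++ [(idx, r.1, comment)]
    | none => acc) ([] : List (Nat × List Char × List Char))
  if commented.length < 2 then st
  else
    let col := commented.foldl (fun m t => Nat.max m t.2.1.length) 0 + 2
    commented.foldl (fun st t =>
      let newLine : String := String.ofList (t.2.1 ++ List.replicate (col - t.2.1.length) ' ' ++ t.2.2 ++ ['\n'])
      if newLine = lines.getD t.1 "" then st else (st.1.set t.1 newLine, true)) st

-- termination helper for A's outer while (the group is nonempty at its start)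
theorem collectA_cons (lines : List String) (ind : List Char) (i : Nat)
    (h1 : i < lines.length) (h2 : ¬ isGroupBreaker (lineAt lines i) = true)
    (h3 : getIndent (lineAt lines i) = ind) :
    collectA lines ind i = i :: collectA lines ind (i + 1) := by
  rw [collectA, dif_pos ⟨h1, by simpa using h2, h3⟩]

-- A's outer while-loop
def loopA (lines : List String) (i : Nat) (out : List String) (changed : Bool) :
    List String × Bool :=
  if h : i < lines.length then
    if hb : isGroupBreaker (lineAt lines i) then loopA lines (i + 1) out changed
    else
      let g := collectA lines (getIndent (lineAt lines i)) i
      let r := fmtGroupA lines g (out, changed)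
      loopA lines (i + g.length) r.1 r.2
  else (out, changed)
termination_by lines.length - i
decreasing_by
  · omega
  · have hc := collectA_cons lines _ i h hb rfl
    have : 0 < (collectA lines (getIndent (lineAt lines i)) i).length := by
      rw [hc]; simp
    omega

def pass_trailing_comments_py (lines : List String) : List String × Bool :=
  loopA lines 0 lines false

-- ===== PORT B =====
-- pass 1: label each line with a group id (none on breaker lines); a new id is
-- opened after a breaker or when the indent changes
def gidStep (st : List (Option Int) × Int × Option (List Char)) (line : String) :
    List (Option Int) × Int × Option (List Char) :=
  if isGroupBreaker line.toList then (st.1 ++ [none], st.2.1, none)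
  else
    let ind := getIndent line.toList
    match st.2.2 with
    | none => (st.1 ++ [some (st.2.1 + 1)], st.2.1 + 1, some ind)
    | some p =>
        if ind = p then (st.1 ++ [some st.2.1], st.2.1, some ind)
        else (st.1 ++ [some (st.2.1 + 1)], st.2.1 + 1, some ind)

def buildGids (lines : List String) : List (Option Int) :=
  (lines.foldl gidStep ([], -1, none)).1

-- pass 2: the dict fold aggregating (count, max code width) per group id
-- (stats[g] = stats.get(g, (0, 0)) updated; counts/widths are nonnegative ints)
def statStep (st : PySem.Dict Int (Nat × Nat))
    (p : Option Int × (List Char × Option (List Char))) : PySem.Dict Int (Nat × Nat) :=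
  match p.1, p.2.2 with
  | some g, some _ =>
      if (PySem.Chars.strip p.2.1).isEmpty then st
      else
        let cm := st.getD g (0, 0)
        st.insert g (cm.1 + 1, Nat.max cm.2 p.2.1.length)
  | _, _ => st

-- pass 3: one line's output and whether it changed (stats[g] exists whenever the
-- guard holds — it was counted at least twice — so the getD default never fires)
def emitOne (stats : PySem.Dict Int (Nat × Nat))
    (p : String × Option Int × (List Char × Option (List Char))) : String × Bool :=
  match p.2.1, p.2.2.2 with
  | some g, some comment =>
      if (PySem.Chars.strip p.2.2.1).isEmpty = false ∧ 2 ≤ (stats.getD g (0, 0)).1 then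
        let col := (stats.getD g (0, 0)).2 + 2
        let newLine : String :=
          String.ofList (p.2.2.1 ++ List.replicate (col - p.2.2.1.length) ' ' ++ comment ++ ['\n'])
        if newLine = p.1 then (p.1, false) else (newLine, true)
      else (p.1, false)
  | _, _ => (p.1, false)

def pass_trailing_comments_py_alt (lines : List String) : List String × Bool :=
  let gids := buildGids lines
  let parsed := lines.map (fun l => splitComment l.toList)
  let stats := (gids.zip parsed).foldl statStep (PySem.Dict.mk [])
  (lines.zip (gids.zip parsed)).foldl
    (fun st p => let r := emitOne stats p; (st.1 ++ [r.1], st.2 || r.2)) ([], false)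

-- ===== PRECONDITION & SPEC =====
def Spec_pass_trailing_comments_py (lines : List String) (out : List String × Bool) : Prop := out = pass_trailing_comments_py_alt lines
instance (lines : List String) (out : List String × Bool) : Decidable (Spec_pass_trailing_comments_py lines out) := by unfold Spec_pass_trailing_comments_py; infer_instance

-- ===== CLAIM (what is proved, stated in full; the proofs are below) =====
def Claim_equal_pass_trailing_comments_py : Prop := ∀ (lines : List String), Dom_pass_trailing_comments_py lines → Spec_pass_trailing_comments_py lines (pass_trailing_comments_py lines)

-- ===== LEMMAS AND PROOFS =====

-- ---------- shared proof-side abbreviations ----------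
def parseS (l : String) : List Char × Option (List Char) := splitComment l.toList

def parseAt (lines : List String) (j : Nat) : List Char × Option (List Char) :=
  splitComment (lineAt lines j)

def mkLine (code : List Char) (col : Nat) (comment : List Char) : String :=
  String.ofList (code ++ List.replicate (col - code.length) ' ' ++ comment ++ ['\n'])

def activeJ (lines : List String) (j : Nat) : Bool :=
  (parseAt lines j).2.isSome && !(PySem.Chars.strip (parseAt lines j).1).isEmpty

def cOf (lines : List String) (g : List Nat) : List (Nat × List Char × List Char) :=
  g.filterMap (fun idx =>
    match (parseAt lines idx).2 with
    | some comment =>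
        if (PySem.Chars.strip (parseAt lines idx).1).isEmpty then none
        else some (idx, (parseAt lines idx).1, comment)
    | none => none)

def mxOf (lines : List String) (g : List Nat) : Nat :=
  (cOf lines g).foldl (fun m t => Nat.max m t.2.1.length) 0

def colOf (lines : List String) (g : List Nat) : Nat := mxOf lines g + 2

def nlJ (lines : List String) (g : List Nat) (j : Nat) : String :=
  mkLine (parseAt lines j).1 (colOf lines g) ((parseAt lines j).2.getD [])

def wrts (lines : List String) (g : List Nat) : List (Nat × String) :=
  if (cOf lines g).length < 2 then []
  else (cOf lines g).filterMap (fun t =>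
    let nl := mkLine t.2.1 (colOf lines g) t.2.2
    if nl = lines.getD t.1 "" then none else some (t.1, nl))

def applyW (ws : List (Nat × String)) (out : List String) : List String :=
  ws.foldl (fun o p => o.set p.1 p.2) out

def emitW (lines : List String) (g : List Nat) (j : Nat) : String × Bool :=
  if activeJ lines j && decide (2 ≤ (cOf lines g).length) then
    (if nlJ lines g j = lines.getD j "" then (lines.getD j "", false) else (nlJ lines g j, true))
  else (lines.getD j "", false)

-- ---------- A side: fmtGroupA and the outer loop as explicit write lists ----------
theorem foldl_commented (lines : List String) (g : List Nat)
    (acc : List (Nat × List Char × List Char)) :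
    g.foldl (fun acc idx =>
        let r := splitComment (lineAt lines idx)
        match r.2 with
        | some comment =>
            if (PySem.Chars.strip r.1).isEmpty then acc else acc ++ [(idx, r.1, comment)]
        | none => acc) acc
      = acc ++ cOf lines g := by
  induction g generalizing acc with
  | nil => simp [cOf]
  | cons x xs ih =>
      simp only [List.foldl_cons, cOf, List.filterMap_cons]
      cases h : (splitComment (lineAt lines x)).2 with
      | none => simpa [cOf, parseAt, h] using ih acc
      | some comment =>
          by_cases hs : (PySem.Chars.strip (splitComment (lineAt lines x)).1).isEmpty
          · simpa [cOf, parseAt, h, hs] using ih acc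
          · simpa [cOf, parseAt, h, hs] using ih (acc ++ [(x, (splitComment (lineAt lines x)).1, comment)])

theorem not_isEmpty_append {α : Type} (a b : List α) :
    (!(a ++ b).isEmpty) = (!a.isEmpty || !b.isEmpty) := by
  cases a <;> simp

theorem write_fold (lines : List String) (col : Nat)
    (L : List (Nat × List Char × List Char)) (out : List String) (ch : Bool) :
    L.foldl (fun st t =>
        if mkLine t.2.1 col t.2.2 = lines.getD t.1 "" then st
        else (st.1.set t.1 (mkLine t.2.1 col t.2.2), true)) (out, ch)
      = (applyW (L.filterMap (fun t =>
            if mkLine t.2.1 col t.2.2 = lines.getD t.1 "" then none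
            else some (t.1, mkLine t.2.1 col t.2.2))) out,
         ch || !(L.filterMap (fun t =>
            if mkLine t.2.1 col t.2.2 = lines.getD t.1 "" then none
            else some (t.1, mkLine t.2.1 col t.2.2))).isEmpty) := by
  induction L generalizing out ch with
  | nil => simp [applyW]
  | cons t ts ih =>
      simp only [List.foldl_cons, List.filterMap_cons]
      by_cases h : mkLine t.2.1 col t.2.2 = lines.getD t.1 ""
      · simp only [if_pos h]
        exact ih out ch
      · simp only [if_neg h, applyW, List.foldl_cons, List.isEmpty_cons, Bool.not_false,
          Bool.or_true]
        rw [ih (out.set t.1 (mkLine t.2.1 col t.2.2)) true]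
        simp [applyW]

theorem fmtA_writes (lines : List String) (g : List Nat) (out : List String) (ch : Bool) :
    fmtGroupA lines g (out, ch) = (applyW (wrts lines g) out, ch || !(wrts lines g).isEmpty) := by
  show (let commented := g.foldl (fun acc idx =>
          let r := splitComment (lineAt lines idx)
          match r.2 with
          | some comment =>
              if (PySem.Chars.strip r.1).isEmpty then acc else acc ++ [(idx, r.1, comment)]
          | none => acc) ([] : List (Nat × List Char × List Char))
        if commented.length < 2 then ((out, ch) : List String × Bool)
        else
          let col := commented.foldl (fun m t => Nat.max m t.2.1.length) 0 + 2
          commented.foldl (fun st t =>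
            let newLine : String := String.ofList (t.2.1 ++ List.replicate (col - t.2.1.length) ' ' ++ t.2.2 ++ ['\n'])
            if newLine = lines.getD t.1 "" then st else (st.1.set t.1 newLine, true)) (out, ch))
      = (applyW (wrts lines g) out, ch || !(wrts lines g).isEmpty)
  simp only [foldl_commented lines g [], List.nil_append]
  by_cases h : (cOf lines g).length < 2
  · simp [wrts, h, applyW]
  · simp only [if_neg h, wrts]
    exact write_fold lines (colOf lines g) (cOf lines g) out ch

theorem foldA_writes (lines : List String) (gs : List (List Nat)) (out : List String) (ch : Bool) :
    gs.foldl (fun st g => fmtGroupA lines g st) (out, ch)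
      = (applyW (gs.flatMap (wrts lines)) out, ch || !(gs.flatMap (wrts lines)).isEmpty) := by
  induction gs generalizing out ch with
  | nil => simp [applyW]
  | cons g gs ih =>
      simp only [List.foldl_cons, List.flatMap_cons, fmtA_writes]
      rw [ih, not_isEmpty_append]
      simp [applyW, List.foldl_append, Bool.or_assoc]

-- the group partition A's outer loop traverses, from position i
def groupsFrom (lines : List String) (i : Nat) : List (List Nat) :=
  if h : i < lines.length then
    if hb : isGroupBreaker (lineAt lines i) then groupsFrom lines (i + 1)
    else
      let g := collectA lines (getIndent (lineAt lines i)) i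
      g :: groupsFrom lines (i + g.length)
  else []
termination_by lines.length - i
decreasing_by
  · omega
  · have hc := collectA_cons lines _ i h hb rfl
    have : 0 < (collectA lines (getIndent (lineAt lines i)) i).length := by
      rw [hc]; simp
    omega

theorem groupsFrom_stop (lines : List String) (i : Nat) (h : ¬ i < lines.length) :
    groupsFrom lines i = [] := by rw [groupsFrom, dif_neg h]

theorem groupsFrom_breaker (lines : List String) (i : Nat) (h : i < lines.length)
    (hb : isGroupBreaker (lineAt lines i) = true) :
    groupsFrom lines i = groupsFrom lines (i + 1) := by
  rw [groupsFrom, dif_pos h, dif_pos hb]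

theorem groupsFrom_group (lines : List String) (i : Nat) (h : i < lines.length)
    (hb : ¬ isGroupBreaker (lineAt lines i) = true) :
    groupsFrom lines i
      = collectA lines (getIndent (lineAt lines i)) i
        :: groupsFrom lines (i + (collectA lines (getIndent (lineAt lines i)) i).length) := by
  rw [groupsFrom, dif_pos h, dif_neg hb]

theorem loopA_eq_foldl (lines : List String) (i : Nat) (out : List String) (ch : Bool) :
    loopA lines i out ch
      = (groupsFrom lines i).foldl (fun st g => fmtGroupA lines g st) (out, ch) := by
  induction i, out, ch using loopA.induct lines with
  | case1 i out ch h hb ih =>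
      rw [loopA, dif_pos h, dif_pos hb, groupsFrom_breaker lines i h hb, ih]
  | case2 i out ch h hb g r ih =>
      rw [loopA, dif_pos h, dif_neg hb, groupsFrom_group lines i h hb]
      simpa using ih
  | case3 i out ch h =>
      rw [loopA, dif_neg h, groupsFrom_stop lines i h]
      simp

-- ---------- collectA structure ----------
theorem collectA_stop (lines : List String) (ind : List Char) (i : Nat)
    (h : ¬ i < lines.length) : collectA lines ind i = [] := by
  rw [collectA, dif_neg (by tauto)]

theorem collectA_breaker (lines : List String) (ind : List Char) (i : Nat)
    (hb : isGroupBreaker (lineAt lines i) = true) : collectA lines ind i = [] := by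
  rw [collectA, dif_neg (by simp [hb])]

theorem collectA_ne (lines : List String) (ind : List Char) (i : Nat)
    (hne : getIndent (lineAt lines i) ≠ ind) : collectA lines ind i = [] := by
  rw [collectA, dif_neg (by tauto)]

theorem collectA_range' (lines : List String) (ind : List Char) (i : Nat) :
    collectA lines ind i = List.range' i (collectA lines ind i).length := by
  induction i using collectA.induct lines ind with
  | case1 i h ih =>
      rw [collectA_cons lines ind i h.1 (by simp [h.2.1]) h.2.2]
      simp only [List.length_cons, List.range'_succ]
      rw [← ih]
  | case2 i h =>
      rw [collectA, dif_neg h]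
      simp

theorem collectA_le (lines : List String) (ind : List Char) (i : Nat) :
    (collectA lines ind i).length ≤ lines.length - i := by
  induction i using collectA.induct lines ind with
  | case1 i h ih =>
      rw [collectA_cons lines ind i h.1 (by simp [h.2.1]) h.2.2]
      have := h.1
      simp only [List.length_cons]
      omega
  | case2 i h =>
      rw [collectA, dif_neg h]
      simp

-- ---------- B side pass 1: labels ----------
def labelsFrom (lines : List String) (i : Nat) (c : Int) : List (Option Int) :=
  if h : i < lines.length then
    if hb : isGroupBreaker (lineAt lines i) then none :: labelsFrom lines (i + 1) c
    else
      let k := (collectA lines (getIndent (lineAt lines i)) i).length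
      List.replicate k (some (c + 1)) ++ labelsFrom lines (i + k) (c + 1)
  else []
termination_by lines.length - i
decreasing_by
  · omega
  · have hc := collectA_cons lines _ i h hb rfl
    have : 0 < (collectA lines (getIndent (lineAt lines i)) i).length := by
      rw [hc]; simp
    omega

theorem labelsFrom_stop (lines : List String) (i : Nat) (c : Int)
    (h : ¬ i < lines.length) : labelsFrom lines i c = [] := by
  rw [labelsFrom, dif_neg h]

theorem labelsFrom_breaker (lines : List String) (i : Nat) (c : Int)
    (h : i < lines.length) (hb : isGroupBreaker (lineAt lines i) = true) :
    labelsFrom lines i c = none :: labelsFrom lines (i + 1) c := by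
  rw [labelsFrom, dif_pos h, dif_pos hb]

theorem labelsFrom_group (lines : List String) (i : Nat) (c : Int)
    (h : i < lines.length) (hb : ¬ isGroupBreaker (lineAt lines i) = true) :
    labelsFrom lines i c
      = List.replicate (collectA lines (getIndent (lineAt lines i)) i).length (some (c + 1))
          ++ labelsFrom lines (i + (collectA lines (getIndent (lineAt lines i)) i).length) (c + 1) := by
  rw [labelsFrom, dif_pos h, dif_neg hb]

theorem labelsFrom_mono_aux (lines : List String) : ∀ n i c, lines.length ≤ i + n →
    ∀ x ∈ labelsFrom lines i c, ∀ g : Int, x = some g → c < g := by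
  intro n
  induction n with
  | zero =>
      intro i c hi x hx
      rw [labelsFrom_stop lines i c (by omega)] at hx
      simp at hx
  | succ n ih =>
      intro i c hi x hx g hg
      by_cases h : i < lines.length
      · by_cases hb : isGroupBreaker (lineAt lines i)
        · rw [labelsFrom_breaker lines i c h hb] at hx
          rcases List.mem_cons.1 hx with rfl | hx'
          · exact absurd hg (by simp)
          · exact ih (i + 1) c (by omega) x hx' g hg
        · rw [labelsFrom_group lines i c h hb] at hx
          have hk1 : collectA lines (getIndent (lineAt lines i)) i
              = i :: collectA lines (getIndent (lineAt lines i)) (i + 1) :=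
            collectA_cons lines _ i h hb rfl
          have hk2 : 0 < (collectA lines (getIndent (lineAt lines i)) i).length := by
            rw [hk1]; simp
          rcases List.mem_append.1 hx with hx' | hx'
          · have := List.eq_of_mem_replicate hx'
            subst this
            cases hg
            omega
          · have := ih (i + (collectA lines (getIndent (lineAt lines i)) i).length) (c + 1)
              (by omega) x hx' g hg
            omega
      · rw [labelsFrom_stop lines i c h] at hx
        simp at hx

theorem labelsFrom_mono (lines : List String) (i : Nat) (c : Int) :
    ∀ x ∈ labelsFrom lines i c, ∀ g : Int, x = some g → c < g :=
  labelsFrom_mono_aux lines lines.length i c (by omega)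

def labelsCont (lines : List String) (i : Nat) (c : Int) (ind : List Char) : List (Option Int) :=
  List.replicate (collectA lines ind i).length (some c)
    ++ labelsFrom lines (i + (collectA lines ind i).length) c

theorem gid_aux (lines : List String) : ∀ n i, lines.length ≤ i + n →
    (∀ acc c, ((lines.drop i).foldl gidStep (acc, c, none)).1 = acc ++ labelsFrom lines i c)
    ∧ (∀ acc c ind, ((lines.drop i).foldl gidStep (acc, c, some ind)).1
        = acc ++ labelsCont lines i c ind) := by
  intro n
  induction n with
  | zero =>
      intro i hi
      have hd : lines.drop i = [] := List.drop_eq_nil_of_le (by omega)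
      constructor
      · intro acc c
        simp [hd, labelsFrom_stop lines i c (by omega)]
      · intro acc c ind
        simp [hd, labelsCont, collectA_stop lines ind i (by omega),
          labelsFrom_stop lines i c (by omega)]
  | succ n ih =>
      intro i hi
      by_cases h : i < lines.length
      · have hz : lines.drop i = lines[i] :: lines.drop (i + 1) := List.drop_eq_getElem_cons h
        have hline : lines[i].toList = lineAt lines i := by
          simp [lineAt, List.getD_eq_getElem?_getD, List.getElem?_eq_getElem h]
        by_cases hb : isGroupBreaker (lineAt lines i)
        · -- breaker line
          have hstep0 : ∀ acc c, gidStep (acc, c, none) lines[i] = (acc ++ [none], c, none) := by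
            intro acc c; simp [gidStep, hline, hb]
          have hstep1 : ∀ acc c ind, gidStep (acc, c, some ind) lines[i] = (acc ++ [none], c, none) := by
            intro acc c ind; simp [gidStep, hline, hb]
          constructor
          · intro acc c
            rw [hz, List.foldl_cons, hstep0, (ih (i + 1) (by omega)).1 (acc ++ [none]) c,
              labelsFrom_breaker lines i c h hb]
            simp
          · intro acc c ind
            rw [hz, List.foldl_cons, hstep1, (ih (i + 1) (by omega)).1 (acc ++ [none]) c]
            have hcb : collectA lines ind i = [] := collectA_breaker lines ind i hb
            simp [labelsCont, hcb, labelsFrom_breaker lines i c h hb]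
        · -- non-breaker line
          have hcons : collectA lines (getIndent (lineAt lines i)) i
              = i :: collectA lines (getIndent (lineAt lines i)) (i + 1) :=
            collectA_cons lines _ i h hb rfl
          have hstepn : ∀ acc c, gidStep (acc, c, none) lines[i]
              = (acc ++ [some (c + 1)], c + 1, some (getIndent (lineAt lines i))) := by
            intro acc c; simp [gidStep, hline, hb]
          -- common continuation: from a fresh run with indent ind_i and gid c+1
          have hcont : ∀ acc c, ((lines.drop (i + 1)).foldl gidStep
                (acc ++ [some (c + 1)], c + 1, some (getIndent (lineAt lines i)))).1
              = acc ++ labelsFrom lines i c := by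
            intro acc c
            rw [(ih (i + 1) (by omega)).2 (acc ++ [some (c + 1)]) (c + 1)
                (getIndent (lineAt lines i)),
              labelsFrom_group lines i c h hb]
            rw [labelsCont, hcons]
            simp only [List.length_cons, List.replicate_succ, List.append_assoc,
              List.cons_append, List.nil_append]
            have harith : i + ((collectA lines (getIndent (lineAt lines i)) (i + 1)).length + 1)
                = i + 1 + (collectA lines (getIndent (lineAt lines i)) (i + 1)).length := by omega
            rw [harith]
          constructor
          · intro acc c
            rw [hz, List.foldl_cons, hstepn]
            exact hcont acc c
          · intro acc c ind
            by_cases hind : getIndent (lineAt lines i) = ind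
            · -- same indent: the run continues with gid c
              have hstep : gidStep (acc, c, some ind) lines[i]
                  = (acc ++ [some c], c, some (getIndent (lineAt lines i))) := by
                simp [gidStep, hline, hb, hind]
              rw [hz, List.foldl_cons, hstep,
                (ih (i + 1) (by omega)).2 (acc ++ [some c]) c (getIndent (lineAt lines i))]
              have hcons' : collectA lines ind i = i :: collectA lines ind (i + 1) :=
                collectA_cons lines ind i h hb hind
              rw [labelsCont, labelsCont, hcons', ← hind]
              simp only [List.length_cons, List.replicate_succ, List.append_assoc,
                List.cons_append, List.nil_append]
              have harith : i + ((collectA lines (getIndent (lineAt lines i)) (i + 1)).length + 1)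
                  = i + 1 + (collectA lines (getIndent (lineAt lines i)) (i + 1)).length := by omega
              rw [harith]
            · -- indent change: a new run with gid c+1 starts here
              have hstep : gidStep (acc, c, some ind) lines[i]
                  = (acc ++ [some (c + 1)], c + 1, some (getIndent (lineAt lines i))) := by
                simp [gidStep, hline, hb, hind]
              rw [hz, List.foldl_cons, hstep]
              have hce : collectA lines ind i = [] := collectA_ne lines ind i hind
              rw [labelsCont, hce]
              simpa using hcont acc c
      · have hd : lines.drop i = [] := List.drop_eq_nil_of_le (by omega)
        constructor
        · intro acc c
          simp [hd, labelsFrom_stop lines i c h]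
        · intro acc c ind
          simp [hd, labelsCont, collectA_stop lines ind i h, labelsFrom_stop lines i c h]

theorem buildGids_eq (lines : List String) : buildGids lines = labelsFrom lines 0 (-1) := by
  have h := (gid_aux lines lines.length 0 (by omega)).1 [] (-1)
  simpa [buildGids] using h

-- ---------- list utilities ----------
theorem applyW_length (ws : List (Nat × String)) (out : List String) :
    (applyW ws out).length = out.length := by
  induction ws generalizing out with
  | nil => rfl
  | cons p ps ih => simp [applyW, List.foldl_cons] at ih ⊢; rw [ih]; simp

theorem applyW_getD_not_mem (ws : List (Nat × String)) (out : List String) (j : Nat)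
    (h : j ∉ ws.map Prod.fst) : (applyW ws out).getD j "" = out.getD j "" := by
  induction ws generalizing out with
  | nil => rfl
  | cons p ps ih =>
      simp only [List.map_cons, List.mem_cons, not_or] at h
      simp only [applyW, List.foldl_cons] at ih ⊢
      rw [ih _ h.2]
      have hne : ¬ p.1 = j := fun hh => h.1 hh.symm
      simp [List.getD_eq_getElem?_getD, List.getElem?_set, hne]

theorem applyW_getD_mem : ∀ (ws : List (Nat × String)) (out : List String) (j : Nat) (v : String),
    (ws.map Prod.fst).Nodup → (∀ p ∈ ws, p.1 < out.length) → (j, v) ∈ ws →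
    (applyW ws out).getD j "" = v := by
  intro ws
  induction ws with
  | nil => intro out j v _ _ hm; simp at hm
  | cons p ps ih =>
      intro out j v hnd hlt hm
      simp only [List.map_cons, List.nodup_cons] at hnd
      simp only [applyW, List.foldl_cons]
      rcases List.mem_cons.1 hm with rfl | hm'
      · have hj : j < out.length := hlt (j, v) List.mem_cons_self
        show (applyW ps (out.set j v)).getD j "" = v
        rw [applyW_getD_not_mem ps (out.set j v) j (by simpa using hnd.1)]
        simp [List.getD_eq_getElem?_getD, List.getElem?_set, hj]
      · by_cases hpj : p.1 = j
        · exact absurd (hpj ▸ (List.mem_map_of_mem hm' : (j, v).1 ∈ ps.map Prod.fst)) hnd.1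
        · exact ih (out.set p.1 p.2) j v hnd.2
            (by intro q hq; simpa using hlt q (List.mem_cons_of_mem p hq)) hm'

theorem applyW_append (a b : List (Nat × String)) (out : List String) :
    applyW (a ++ b) out = applyW b (applyW a out) := by
  simp [applyW, List.foldl_append]

-- the window [i, i+k) of a list as a map over range'
theorem window_eq (lines : List String) : ∀ k i, i + k ≤ lines.length →
    (lines.drop i).take k = (List.range' i k).map (fun j => lines.getD j "") := by
  intro k
  induction k with
  | zero => intro i _; simp
  | succ k ih =>
      intro i hi
      have h : i < lines.length := by omega
      rw [List.drop_eq_getElem_cons h]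
      simp only [List.take_succ_cons, List.range'_succ, List.map_cons]
      rw [← ih (i + 1) (by omega)]
      congr 1
      simp [List.getD_eq_getElem?_getD, List.getElem?_eq_getElem h]

theorem foldl_updAgg_pair (w : Nat → Nat) (J : List Nat) (s : Nat × Nat) :
    J.foldl (fun s j => (s.1 + 1, Nat.max s.2 (w j))) s
      = (s.1 + J.length, J.foldl (fun m j => Nat.max m (w j)) s.2) := by
  induction J generalizing s with
  | nil => simp
  | cons x xs ih => simp [ih]; omega

theorem cOf_eq (lines : List String) (g : List Nat) :
    cOf lines g = (g.filter (activeJ lines)).map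
      (fun j => (j, (parseAt lines j).1, (parseAt lines j).2.getD [])) := by
  induction g with
  | nil => simp [cOf]
  | cons x xs ih =>
      cases h : (parseAt lines x).2 with
      | none => simp_all [cOf, activeJ]
      | some cm =>
          by_cases hs : (PySem.Chars.strip (parseAt lines x).1).isEmpty <;>
            simp_all [cOf, activeJ]

theorem filterMap_ite {α β : Type} (c : α → Prop) [DecidablePred c] (e : α → β) (l : List α) :
    l.filterMap (fun j => if c j then none else some (e j))
      = (l.filter (fun j => !(decide (c j)))).map e := by
  induction l with
  | nil => simp
  | cons x xs ih =>
      by_cases h : c x <;> simp [h, ih]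

theorem wrts_eq (lines : List String) (g : List Nat) (h2 : ¬ (cOf lines g).length < 2) :
    wrts lines g = ((g.filter (activeJ lines)).filter
        (fun j => !(decide (nlJ lines g j = lines.getD j "")))).map
        (fun j => (j, nlJ lines g j)) := by
  rw [wrts, if_neg h2, cOf_eq, List.filterMap_map]
  exact filterMap_ite (fun j => nlJ lines g j = lines.getD j "")
    (fun j => (j, nlJ lines g j)) (g.filter (activeJ lines))

theorem mem_wrts (lines : List String) (g : List Nat) (j : Nat) (v : String) :
    (j, v) ∈ wrts lines g ↔
      (¬ (cOf lines g).length < 2 ∧ j ∈ g ∧ activeJ lines j = true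
        ∧ nlJ lines g j ≠ lines.getD j "" ∧ v = nlJ lines g j) := by
  by_cases h2 : (cOf lines g).length < 2
  · simp [wrts, h2]
  · rw [wrts_eq lines g h2]
    simp only [List.mem_map, List.mem_filter]
    constructor
    · rintro ⟨j', ⟨⟨hj1, hj2⟩, hj3⟩, hj4⟩
      have : j' = j := congrArg Prod.fst hj4
      subst this
      refine ⟨h2, hj1, hj2, by simpa using hj3, (congrArg Prod.snd hj4).symm⟩
    · rintro ⟨_, hj1, hj2, hj3, rfl⟩
      exact ⟨j, ⟨⟨hj1, hj2⟩, by simpa using hj3⟩, rfl⟩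

theorem map_fst_wrts (lines : List String) (g : List Nat) (j : Nat) :
    j ∈ (wrts lines g).map Prod.fst ↔
      (¬ (cOf lines g).length < 2 ∧ j ∈ g ∧ activeJ lines j = true
        ∧ nlJ lines g j ≠ lines.getD j "") := by
  constructor
  · intro hj
    rcases List.mem_map.1 hj with ⟨⟨j', v⟩, hm, hfst⟩
    obtain ⟨a1, a2, a3, a4, -⟩ := (mem_wrts lines g j' v).1 hm
    exact hfst ▸ ⟨a1, a2, a3, a4⟩
  · rintro ⟨h1, h2, h3, h4⟩
    exact List.mem_map.2 ⟨(j, nlJ lines g j),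
      (mem_wrts lines g j _).2 ⟨h1, h2, h3, h4, rfl⟩, rfl⟩

theorem nodup_fst_wrts (lines : List String) (g : List Nat) (hg : g.Nodup) :
    ((wrts lines g).map Prod.fst).Nodup := by
  by_cases h2 : (cOf lines g).length < 2
  · simp [wrts, h2]
  · rw [wrts_eq lines g h2, List.map_map]
    have : (Prod.fst ∘ fun j => ((j, nlJ lines g j) : Nat × String)) = fun j => j := rfl
    rw [this]
    simpa using ((hg.filter _).filter _)

-- ---------- B side pass 2: the dict fold ----------
def updAgg (s : Nat × Nat) (p : Option Int × (List Char × Option (List Char))) : Nat × Nat :=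
  (s.1 + 1, Nat.max s.2 p.2.1.length)

def keyActive (g : Int) (p : Option Int × (List Char × Option (List Char))) : Bool :=
  (p.1 == some g) && p.2.2.isSome && !(PySem.Chars.strip p.2.1).isEmpty

theorem statStep_getD : ∀ (ps : List (Option Int × (List Char × Option (List Char))))
    (d : PySem.Dict Int (Nat × Nat)) (g : Int),
    ((ps.foldl statStep d).getD g (0, 0))
      = (ps.filter (keyActive g)).foldl updAgg (d.getD g (0, 0)) := by
  intro ps
  induction ps with
  | nil => intro d g; simp
  | cons p ps ih =>
      intro d g
      rcases p with ⟨og, code, ocm⟩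
      simp only [List.foldl_cons, List.filter_cons]
      cases og with
      | none =>
          have h1 : statStep d (none, code, ocm) = d := rfl
          have h2 : keyActive g (none, code, ocm) = false := by simp [keyActive]
          rw [h1, h2]
          simp only [Bool.false_eq_true, if_false]
          exact ih d g
      | some g' =>
          cases ocm with
          | none =>
              have h1 : statStep d (some g', code, none) = d := rfl
              have h2 : keyActive g (some g', code, none) = false := by simp [keyActive]
              rw [h1, h2]
              simp only [Bool.false_eq_true, if_false]
              exact ih d g
          | some cm =>
              by_cases hs : (PySem.Chars.strip code).isEmpty
              · have h1 : statStep d (some g', code, some cm) = d := by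
                  simp [statStep, hs]
                have h2 : keyActive g (some g', code, some cm) = false := by
                  simp [keyActive, hs]
                rw [h1, h2]
                simp only [Bool.false_eq_true, if_false]
                exact ih d g
              · have h1 : statStep d (some g', code, some cm)
                    = d.insert g' ((d.getD g' (0, 0)).1 + 1,
                        Nat.max (d.getD g' (0, 0)).2 code.length) := by
                  simp [statStep, hs]
                rw [h1]
                by_cases hgg : g' = g
                · subst hgg
                  have h2 : keyActive g' (some g', code, some cm) = true := by
                    simp [keyActive, hs]
                  rw [h2, if_pos rfl, List.foldl_cons, ih]
                  congr 1
                  rw [PySem.Dict.getD_insert_self]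
                  rfl
                · have h2 : keyActive g (some g', code, some cm) = false := by
                    simp [keyActive, hs, hgg]
                  rw [h2]
                  simp only [Bool.false_eq_true, if_false]
                  rw [ih]
                  congr 1
                  exact PySem.Dict.getD_insert_of_ne _ _ _ (fun hc => hgg hc.symm)

-- the stats entry of the group labeled c+1 in the situation of the grand induction
theorem stats_group (lines : List String) (P : List (Option Int)) (i k : Nat) (c : Int)
    (hP : ∀ x ∈ P, ∀ g : Int, x = some g → g ≤ c)
    (hPl : P.length = i) (hik : i + k ≤ lines.length) :
    (((P ++ (List.replicate k (some (c + 1)) ++ labelsFrom lines (i + k) (c + 1))).zip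
        (lines.map parseS)).foldl statStep (PySem.Dict.mk [])).getD (c + 1) (0, 0)
      = ((cOf lines (List.range' i k)).length, mxOf lines (List.range' i k)) := by
  have hlen : (lines.map parseS).length = lines.length := by simp
  -- split the parsed list to match the three label segments
  have hsplit : lines.map parseS
      = (lines.map parseS).take i
        ++ (((lines.map parseS).drop i).take k ++ ((lines.map parseS).drop i).drop k) := by
    rw [List.take_append_drop, List.take_append_drop]
  have hW : ((lines.map parseS).drop i).take k
      = (List.range' i k).map (fun j => parseAt lines j) := by
    rw [← List.map_drop, ← List.map_take, window_eq lines k i hik, List.map_map]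
    rfl
  have hrep : (List.replicate k (some (c + 1) : Option Int))
      = (List.range' i k).map (fun _ => some (c + 1)) := by
    have := List.map_const (l := List.range' i k) (b := (some (c + 1) : Option Int))
    simpa using this.symm
  have hz : (P ++ (List.replicate k (some (c + 1)) ++ labelsFrom lines (i + k) (c + 1))).zip
        (lines.map parseS)
      = P.zip ((lines.map parseS).take i)
        ++ ((List.range' i k).map (fun j => ((some (c + 1) : Option Int), parseAt lines j))
            ++ (labelsFrom lines (i + k) (c + 1)).zip (((lines.map parseS).drop i).drop k)) := by
    conv_lhs => rw [hsplit]
    rw [List.zip_append (by simp [hPl]; omega)]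
    congr 1
    rw [List.zip_append (by simp; omega)]
    congr 1
    rw [hrep, hW, List.zip_map']
  rw [statStep_getD, hz]
  have hd0 : (PySem.Dict.mk [] : PySem.Dict Int (Nat × Nat)).getD (c + 1) (0, 0) = (0, 0) := rfl
  rw [hd0, List.filter_append, List.filter_append]
  have hfP : (P.zip ((lines.map parseS).take i)).filter (keyActive (c + 1)) = [] := by
    rw [List.filter_eq_nil_iff]
    intro p hp
    obtain ⟨p1, p2⟩ := p
    have hp1 := (List.of_mem_zip hp).1
    cases hx : p1 with
    | none => simp [keyActive, hx]
    | some g =>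
        have hg := hP p1 hp1 g hx
        have : ¬ g = c + 1 := by omega
        simp [keyActive, hx, this]
  have hfT : ((labelsFrom lines (i + k) (c + 1)).zip
        (((lines.map parseS).drop i).drop k)).filter (keyActive (c + 1)) = [] := by
    rw [List.filter_eq_nil_iff]
    intro p hp
    obtain ⟨p1, p2⟩ := p
    have hp1 := (List.of_mem_zip hp).1
    cases hx : p1 with
    | none => simp [keyActive, hx]
    | some g =>
        have hg := labelsFrom_mono lines (i + k) (c + 1) p1 hp1 g hx
        have : ¬ g = c + 1 := by omega
        simp [keyActive, hx, this]
  rw [hfP, hfT, List.nil_append, List.append_nil]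
  have hpred : ((List.range' i k).map
        (fun j => ((some (c + 1) : Option Int), parseAt lines j))).filter (keyActive (c + 1))
      = ((List.range' i k).filter (activeJ lines)).map
          (fun j => ((some (c + 1) : Option Int), parseAt lines j)) := by
    rw [List.filter_map]
    congr 1
    apply List.filter_congr
    intro j _
    simp [keyActive, activeJ, Function.comp]
  rw [hpred, List.foldl_map]
  have hupd : ((List.range' i k).filter (activeJ lines)).foldl
        (fun s j => updAgg s ((some (c + 1) : Option Int), parseAt lines j)) (0, 0)
      = ((List.range' i k).filter (activeJ lines)).foldl
          (fun s j => (s.1 + 1, Nat.max s.2 (parseAt lines j).1.length)) (0, 0) := rfl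
  rw [hupd, foldl_updAgg_pair (fun j => (parseAt lines j).1.length)]
  rw [Prod.mk.injEq]
  refine ⟨?_, ?_⟩
  · rw [cOf_eq]
    simp
  · rw [mxOf, cOf_eq, List.foldl_map]

-- ---------- the grand induction ----------
def ZFrom (lines : List String) (i : Nat) (c : Int) :
    List (String × Option Int × (List Char × Option (List Char))) :=
  (lines.drop i).zip ((labelsFrom lines i c).zip ((lines.drop i).map parseS))

theorem emitW_snd_iff (lines : List String) (g : List Nat) (j : Nat) :
    (emitW lines g j).2 = true ↔
      (activeJ lines j = true ∧ 2 ≤ (cOf lines g).length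
        ∧ ¬ nlJ lines g j = lines.getD j "") := by
  rw [emitW]
  split_ifs with h1 h2 <;> simp_all

theorem emitW_fst_pos (lines : List String) (g : List Nat) (j : Nat)
    (h : (emitW lines g j).2 = true) : (emitW lines g j).1 = nlJ lines g j := by
  rw [emitW] at h ⊢
  split_ifs at h ⊢ <;> simp_all

theorem emitW_fst_neg (lines : List String) (g : List Nat) (j : Nat)
    (h : (emitW lines g j).2 = false) : (emitW lines g j).1 = lines.getD j "" := by
  rw [emitW] at h ⊢
  split_ifs at h ⊢ <;> simp_all

theorem emit_at (lines : List String) (G : List Nat) (c : Int)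
    (stats : PySem.Dict Int (Nat × Nat))
    (hst : stats.getD (c + 1) (0, 0) = ((cOf lines G).length, mxOf lines G)) (j : Nat) :
    emitOne stats (lines.getD j "", some (c + 1), parseAt lines j) = emitW lines G j := by
  cases hq : (parseAt lines j).2 with
  | none =>
      have ha : activeJ lines j = false := by simp [activeJ, hq]
      have hpq : parseAt lines j = ((parseAt lines j).1, none) := by
        rw [← hq]
      rw [hpq]
      simp [emitOne, emitW, ha]
  | some cm =>
      have hpq : parseAt lines j = ((parseAt lines j).1, some cm) := by
        rw [← hq]
      rw [hpq]
      simp only [emitOne, hst]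
      by_cases hs : (PySem.Chars.strip (parseAt lines j).1).isEmpty
      · have ha : activeJ lines j = false := by simp [activeJ, hq, hs]
        rw [if_neg (by simp [hs]), emitW, if_neg (by simp [ha])]
      · by_cases h2 : 2 ≤ (cOf lines G).length
        · have ha : activeJ lines j = true := by simp [activeJ, hq, hs]
          rw [if_pos ⟨by simpa using hs, h2⟩]
          have hnl2 : String.ofList ((parseAt lines j).1
                ++ List.replicate (((cOf lines G).length, mxOf lines G).2 + 2
                      - (parseAt lines j).1.length) ' '
                ++ cm ++ ['\n'])
              = nlJ lines G j := by
            rw [nlJ, mkLine, hq]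
            rfl
          have hrhs : emitW lines G j
              = (if nlJ lines G j = lines.getD j "" then (lines.getD j "", false)
                 else (nlJ lines G j, true)) := by
            rw [emitW, if_pos (by simp [ha, h2])]
          rw [hnl2, hrhs]
        · have hg : ¬ ((PySem.Chars.strip (parseAt lines j).1).isEmpty = false
              ∧ 2 ≤ ((cOf lines G).length, mxOf lines G).1) := by
            intro hc
            exact h2 hc.2
          rw [if_neg hg, emitW, if_neg (by simp [h2])]

theorem wrts_isEmpty (lines : List String) (g : List Nat) :
    (!(wrts lines g).isEmpty) = g.any (fun j => (emitW lines g j).2) := by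
  rw [Bool.eq_iff_iff]
  constructor
  · intro h
    obtain ⟨⟨j, v⟩, hm⟩ : ∃ p, p ∈ wrts lines g := by
      cases hw : wrts lines g with
      | nil => rw [hw] at h; simp at h
      | cons p ps => exact ⟨p, List.mem_cons_self⟩
    obtain ⟨h2, hjg, ha, hne, rfl⟩ := (mem_wrts lines g j v).1 hm
    refine List.any_eq_true.2 ⟨j, hjg, ?_⟩
    exact (emitW_snd_iff lines g j).2 ⟨ha, by omega, hne⟩
  · intro h
    obtain ⟨j, hjg, hj⟩ := List.any_eq_true.1 h
    obtain ⟨ha, h2, hne⟩ := (emitW_snd_iff lines g j).1 hj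
    have hm := (mem_wrts lines g j (nlJ lines g j)).2 ⟨by omega, hjg, ha, hne, rfl⟩
    cases hw : wrts lines g with
    | nil => rw [hw] at hm; simp at hm
    | cons p ps => simp

theorem getD_of_lt (l : List String) (m : Nat) (h : m < l.length) : l[m] = l.getD m "" := by
  simp [List.getD_eq_getElem?_getD, List.getElem?_eq_getElem h]

theorem group_take (lines out : List String) (i k : Nat)
    (hlen : out.length = lines.length) (hik : i + k ≤ lines.length)
    (hag : ∀ j, i ≤ j → out.getD j "" = lines.getD j "") :
    (applyW (wrts lines (List.range' i k)) out).take (i + k)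
      = out.take i ++ (List.range' i k).map
          (fun j => (emitW lines (List.range' i k) j).1) := by
  have hwlt : ∀ p ∈ wrts lines (List.range' i k), p.1 < out.length := by
    intro p hp
    obtain ⟨p1, p2⟩ := p
    obtain ⟨-, hj, -, -, -⟩ := (mem_wrts lines (List.range' i k) p1 p2).1 hp
    have := List.mem_range'_1.1 hj
    omega
  have hnd : ((wrts lines (List.range' i k)).map Prod.fst).Nodup :=
    nodup_fst_wrts lines (List.range' i k) (List.nodup_range' 1)
  have hlenA : (applyW (wrts lines (List.range' i k)) out).length = out.length :=
    applyW_length _ _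
  apply List.ext_getElem
  · simp [hlenA, hlen]
    omega
  · intro m hm1 hm2
    have hmik : m < i + k := by
      simpa [hlenA, hlen, Nat.min_def, hik] using hm1
    rw [List.getElem_take]
    by_cases hmi : m < i
    · rw [List.getElem_append_left (by simp [hlen]; omega)]
      rw [List.getElem_take]
      have hnm : m ∉ (wrts lines (List.range' i k)).map Prod.fst := by
        intro hc
        have := ((map_fst_wrts lines (List.range' i k) m).1 hc).2.1
        have := (List.mem_range'_1.1 this).1
        omega
      rw [getD_of_lt (applyW (wrts lines (List.range' i k)) out) m
          (by rw [hlenA, hlen]; omega),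
        applyW_getD_not_mem _ _ _ hnm,
        getD_of_lt out m (by rw [hlen]; omega)]
    · have hmi' : i ≤ m := by omega
      rw [List.getElem_append_right (by simp [hlen]; omega)]
      have hlt : m - (out.take i).length < ((List.range' i k).map
          (fun j => (emitW lines (List.range' i k) j).1)).length := by
        simp [hlen]
        omega
      rw [List.getElem_map]
      have hri : (List.range' i k)[m - (out.take i).length]'(by simp [hlen]; omega) = m := by
        rw [List.getElem_range']
        simp [hlen]
        omega
      rw [hri]
      rw [getD_of_lt (applyW (wrts lines (List.range' i k)) out) m
          (by rw [hlenA, hlen]; omega)]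
      by_cases hw : (emitW lines (List.range' i k) m).2 = true
      · obtain ⟨ha, h2, hne⟩ := (emitW_snd_iff lines (List.range' i k) m).1 hw
        have hm' := (mem_wrts lines (List.range' i k) m
            (nlJ lines (List.range' i k) m)).2
          ⟨by omega, List.mem_range'_1.2 ⟨hmi', by omega⟩, ha, hne, rfl⟩
        rw [applyW_getD_mem _ _ _ _ hnd hwlt hm', emitW_fst_pos lines _ m hw]
      · have hw' : (emitW lines (List.range' i k) m).2 = false := by
          simpa using hw
        have hnm : m ∉ (wrts lines (List.range' i k)).map Prod.fst := by
          intro hc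
          obtain ⟨h2', -, ha, hne⟩ := (map_fst_wrts lines (List.range' i k) m).1 hc
          exact hw ((emitW_snd_iff lines (List.range' i k) m).2 ⟨ha, by omega, hne⟩)
        rw [applyW_getD_not_mem _ _ _ hnm, emitW_fst_neg lines _ m hw',
          hag m hmi']

theorem ZFrom_breaker (lines : List String) (i : Nat) (c : Int)
    (h : i < lines.length) (hb : isGroupBreaker (lineAt lines i) = true) :
    ZFrom lines i c
      = (lines.getD i "", (none : Option Int), parseS (lines.getD i ""))
          :: ZFrom lines (i + 1) c := by
  have hd : lines.drop i = lines.getD i "" :: lines.drop (i + 1) := by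
    rw [List.drop_eq_getElem_cons h, getD_of_lt lines i h]
  rw [ZFrom, labelsFrom_breaker lines i c h hb, hd]
  rfl

theorem ZFrom_group (lines : List String) (i : Nat) (c : Int)
    (h : i < lines.length) (hb : ¬ isGroupBreaker (lineAt lines i) = true) :
    ZFrom lines i c
      = (List.range' i (collectA lines (getIndent (lineAt lines i)) i).length).map
          (fun j => (lines.getD j "", (some (c + 1) : Option Int), parseAt lines j))
        ++ ZFrom lines (i + (collectA lines (getIndent (lineAt lines i)) i).length) (c + 1) := by
  set k := (collectA lines (getIndent (lineAt lines i)) i).length with hk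
  have hkle : k ≤ lines.length - i := hk ▸ collectA_le lines _ i
  have hik : i + k ≤ lines.length := by omega
  have hW : (lines.drop i).take k = (List.range' i k).map (fun j => lines.getD j "") :=
    window_eq lines k i hik
  have hWl : ((lines.drop i).take k).length = k := by
    simp
    omega
  have hdw : lines.drop i = (lines.drop i).take k ++ lines.drop (i + k) := by
    conv_lhs => rw [← List.take_append_drop k (lines.drop i)]
    rw [List.drop_drop]
  have hrep : (List.replicate k (some (c + 1) : Option Int))
      = (List.range' i k).map (fun _ => some (c + 1)) := by
    have := List.map_const (l := List.range' i k) (b := (some (c + 1) : Option Int))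
    simpa using this.symm
  rw [ZFrom, labelsFrom_group lines i c h hb, ← hk]
  conv_lhs => rw [hdw]
  rw [List.map_append, List.zip_append (by simp; all_goals omega)]
  rw [List.zip_append (by simp; all_goals omega)]
  congr 1
  rw [hW, hrep, List.map_map, List.zip_map', List.zip_map']
  apply List.map_congr_left
  intro j _
  rfl

theorem any_congr' {α : Type} (l : List α) (p q : α → Bool)
    (h : ∀ x ∈ l, p x = q x) : l.any p = l.any q := by
  induction l with
  | nil => rfl
  | cons x xs ih => simp_all

theorem emitOne_none (stats : PySem.Dict Int (Nat × Nat)) (s : String)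
    (pr : List Char × Option (List Char)) :
    emitOne stats (s, none, pr) = (s, false) := by
  cases hq : pr.2 <;> simp [emitOne, hq]

theorem mainM (lines : List String) : ∀ n i c (P : List (Option Int)) (out : List String)
    (stats : PySem.Dict Int (Nat × Nat)),
    lines.length ≤ i + n →
    out.length = lines.length →
    (∀ j, i ≤ j → out.getD j "" = lines.getD j "") →
    P.length = i →
    (∀ x ∈ P, ∀ g : Int, x = some g → g ≤ c) →
    stats = ((P ++ labelsFrom lines i c).zip (lines.map parseS)).foldl statStep (PySem.Dict.mk []) →
    applyW ((groupsFrom lines i).flatMap (wrts lines)) out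
        = out.take i ++ (ZFrom lines i c).map (fun p => (emitOne stats p).1)
      ∧ (!((groupsFrom lines i).flatMap (wrts lines)).isEmpty)
        = (ZFrom lines i c).any (fun p => (emitOne stats p).2) := by
  intro n
  induction n with
  | zero =>
      intro i c P out stats hi hlen hag hPl hP hst
      have hni : ¬ i < lines.length := by omega
      have hdrop : lines.drop i = [] := List.drop_eq_nil_of_le (by omega)
      have hZ : ZFrom lines i c = [] := by
        rw [ZFrom, hdrop]
        simp
      rw [groupsFrom_stop lines i hni, hZ]
      constructor
      · simp [applyW, List.take_of_length_le (by omega : out.length ≤ i)]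
      · simp
  | succ n ih =>
      intro i c P out stats hi hlen hag hPl hP hst
      by_cases h : i < lines.length
      · by_cases hb : isGroupBreaker (lineAt lines i)
        · -- breaker line: nothing written here, one line copied through
          have htake : out.take (i + 1) = out.take i ++ [out.getD i ""] := by
            rw [List.take_succ, List.getElem?_eq_getElem (by omega : i < out.length)]
            simp [getD_of_lt out i (by omega)]
          obtain ⟨ih1, ih2⟩ := ih (i + 1) c (P ++ [none]) out stats (by omega) hlen
            (fun j hj => hag j (by omega)) (by simp [hPl])
            (by
              intro x hx g hg
              rcases List.mem_append.1 hx with hx' | hx'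
              · exact hP x hx' g hg
              · simp at hx'
                subst hx'
                simp at hg)
            (by
              rw [hst, labelsFrom_breaker lines i c h hb]
              congr 2
              simp)
          rw [groupsFrom_breaker lines i h hb, ZFrom_breaker lines i c h hb]
          constructor
          · rw [ih1, List.map_cons, htake, hag i (le_refl i)]
            simp [emitOne_none]
          · rw [ih2, List.any_cons]
            simp [emitOne_none]
        · -- a group starts here
          have hcons : collectA lines (getIndent (lineAt lines i)) i
              = i :: collectA lines (getIndent (lineAt lines i)) (i + 1) :=
            collectA_cons lines _ i h hb rfl
          set k := (collectA lines (getIndent (lineAt lines i)) i).length with hk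
          have hk1 : 0 < k := by rw [hk, hcons]; simp
          have hkle : k ≤ lines.length - i := hk ▸ collectA_le lines _ i
          have hik : i + k ≤ lines.length := by omega
          have hR : collectA lines (getIndent (lineAt lines i)) i = List.range' i k := by
            rw [hk]
            exact collectA_range' lines _ i
          have hstats : stats.getD (c + 1) (0, 0)
              = ((cOf lines (List.range' i k)).length, mxOf lines (List.range' i k)) := by
            rw [hst, labelsFrom_group lines i c h hb, ← hk]
            exact stats_group lines P i k c hP hPl hik
          set out' := applyW (wrts lines (List.range' i k)) out with hout'
          have hlen' : out'.length = lines.length := by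
            rw [hout', applyW_length, hlen]
          have hag' : ∀ j, i + k ≤ j → out'.getD j "" = lines.getD j "" := by
            intro j hj
            have hnm : j ∉ (wrts lines (List.range' i k)).map Prod.fst := by
              intro hc
              have := ((map_fst_wrts lines (List.range' i k) j).1 hc).2.1
              have := (List.mem_range'_1.1 this).2
              omega
            rw [hout', applyW_getD_not_mem _ _ _ hnm, hag j (by omega)]
          obtain ⟨ih1, ih2⟩ := ih (i + k) (c + 1)
            (P ++ List.replicate k (some (c + 1))) out' stats (by omega) hlen' hag'
            (by simp [hPl])
            (by
              intro x hx g hg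
              rcases List.mem_append.1 hx with hx' | hx'
              · have := hP x hx' g hg
                omega
              · have := List.eq_of_mem_replicate hx'
                subst this
                cases hg
                omega)
            (by
              rw [hst, labelsFrom_group lines i c h hb, ← hk]
              congr 2
              simp)
          rw [groupsFrom_group lines i h hb, ← hk, hR, List.flatMap_cons, applyW_append,
            ZFrom_group lines i c h hb, ← hk]
          have hemit : ∀ j, emitOne stats (lines.getD j "", some (c + 1), parseAt lines j)
              = emitW lines (List.range' i k) j :=
            emit_at lines (List.range' i k) c stats hstats
          constructor
          · rw [← hout', ih1, hout', group_take lines out i k hlen hik hag,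
              List.map_append, List.map_map]
            rw [List.append_assoc]
            congr 2
            apply List.map_congr_left
            intro j _
            simp only [Function.comp_apply]
            rw [hemit j]
          · rw [not_isEmpty_append, ih2, wrts_isEmpty, List.any_append, List.any_map]
            congr 1
            apply any_congr'
            intro j _
            simp only [Function.comp_apply]
            rw [hemit j]
      · have hdrop : lines.drop i = [] := List.drop_eq_nil_of_le (by omega)
        have hZ : ZFrom lines i c = [] := by
          rw [ZFrom, hdrop]
          simp
        rw [groupsFrom_stop lines i h, hZ]
        constructor
        · simp [applyW, List.take_of_length_le (by omega : out.length ≤ i)]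
        · simp

-- ---------- B as a map/any over the zipped lines ----------
theorem emit_fold (stats : PySem.Dict Int (Nat × Nat))
    (Z : List (String × Option Int × (List Char × Option (List Char))))
    (acc : List String) (b : Bool) :
    Z.foldl (fun st p => let r := emitOne stats p; (st.1 ++ [r.1], st.2 || r.2)) (acc, b)
      = (acc ++ Z.map (fun p => (emitOne stats p).1), b || Z.any (fun p => (emitOne stats p).2)) := by
  induction Z generalizing acc b with
  | nil => simp
  | cons p ps ih => simp [ih, Bool.or_assoc]


-- ===== VERDICT (by name: the statement is the Claim_ definition above) =====
theorem pass_trailing_comments_py_spec : Claim_equal_pass_trailing_comments_py := by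
  intro lines _
  show pass_trailing_comments_py lines = pass_trailing_comments_py_alt lines
  have hM := mainM lines lines.length 0 (-1) [] lines
      (((buildGids lines).zip (lines.map parseS)).foldl statStep (PySem.Dict.mk []))
      (by omega) rfl (fun j _ => rfl) rfl (by simp)
      (by rw [buildGids_eq]; rfl)
  have hA : pass_trailing_comments_py lines
      = (applyW ((groupsFrom lines 0).flatMap (wrts lines)) lines,
         !((groupsFrom lines 0).flatMap (wrts lines)).isEmpty) := by
    rw [pass_trailing_comments_py, loopA_eq_foldl, foldA_writes]
    simp
  have hB : pass_trailing_comments_py_alt lines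
      = ((ZFrom lines 0 (-1)).map
            (fun p => (emitOne (((buildGids lines).zip (lines.map parseS)).foldl statStep (PySem.Dict.mk [])) p).1),
         (ZFrom lines 0 (-1)).any
            (fun p => (emitOne (((buildGids lines).zip (lines.map parseS)).foldl statStep (PySem.Dict.mk [])) p).2)) := by
    rw [pass_trailing_comments_py_alt]
    simp only [emit_fold]
    rw [ZFrom, buildGids_eq]
    rfl
  rw [hA, hB, hM.1, hM.2]
  simp
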